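-- pv_equiv track=rewrite | github.com/FrancescoTC/chess_behavior_recognition | pgn2png/phase_manager.py | check_if_is_endgame
-- ===== SOURCE A (Python) =====
-- white_pieces = {
--     'R': 5,
--     'B': 3,
--     'N': 3,
--     'Q': 9,
--     'P': 1
-- }
--
-- black_pieces = {
--     'r': 5,
--     'b': 3,
--     'n': 3,
--     'q': 9,
--     'p': 1
-- }
--
-- def check_if_is_endgame(fen: str) -> bool:
--     '''
--     From a FEN, check if the position is considerable endgame.
--     The input fen could be the entire FEN (ex: "rn2qrk1/ppp4p/3b4/5p2/2NPpP2/P1P5/6PP/R1BQK2R w KQ - 1 15")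
--     or only the pieces on the board (ex: "rn2qrk1/ppp4p/3b4/5p2/2NPpP2/P1P5/6PP/R1BQK2R").
--
--     Input:
--         fen: str -> the FEN of the position
--     Output:
--         bool -> True if both players have at most 13 points of material each, False otherwise
--     '''
--     w_material = 0
--     b_material = 0
--     for char in fen:
--         if char == ' ':
--             return (w_material <= 13) and (b_material <= 13)
--         try:
--             if char.islower():
--                 b_material = b_material + black_pieces[char]
--             elif char.isupper():
--                 w_material = w_material + white_pieces[char]
--         except KeyError:
--             continue
--     return (w_material <= 13) and (b_material <= 13)
-- ===== SOURCE B (Python) =====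
-- from collections import Counter
--
-- white_pieces = {'R': 5, 'B': 3, 'N': 3, 'Q': 9, 'P': 1}
-- black_pieces = {'r': 5, 'b': 3, 'n': 3, 'q': 9, 'p': 1}
--
-- def check_if_is_endgame(fen: str) -> bool:
--     board = fen.split(' ', 1)[0]
--     counts = Counter(board)
--     w_material = sum(white_pieces[c] * n for c, n in counts.items() if c in white_pieces)
--     b_material = sum(black_pieces[c] * n for c, n in counts.items() if c in black_pieces)
--     return (w_material <= 13) and (b_material <= 13)
-- ===== Notes on version B (the rewrite author's own statement) =====
-- stated objective: alternative
-- what changed: Replaced the single streaming char loop with early return by a three-phase pipeline: split off the board segment at the first space, build a character frequency table over it, then aggregate each side's material as a sum of piece-value times count over the table's distinct keys.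
import Mathlib
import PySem

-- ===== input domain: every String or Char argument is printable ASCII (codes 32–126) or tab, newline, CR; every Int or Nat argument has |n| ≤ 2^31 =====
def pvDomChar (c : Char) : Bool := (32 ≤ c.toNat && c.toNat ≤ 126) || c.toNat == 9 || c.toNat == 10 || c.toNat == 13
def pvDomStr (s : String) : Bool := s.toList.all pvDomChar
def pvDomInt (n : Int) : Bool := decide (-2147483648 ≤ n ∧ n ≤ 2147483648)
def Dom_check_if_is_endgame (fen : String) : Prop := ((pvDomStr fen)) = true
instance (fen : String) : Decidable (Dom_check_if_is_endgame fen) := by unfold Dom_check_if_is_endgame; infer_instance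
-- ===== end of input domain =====

-- B replaces A's streaming loop with early return by segment extraction (split at the
-- first space) plus a frequency table aggregated per distinct piece; objective: alternative.

-- ===== PORT A =====
def pvWhitePieces : PySem.Dict Char Int :=
  PySem.Dict.ofList [('R', 5), ('B', 3), ('N', 3), ('Q', 9), ('P', 1)]

def pvBlackPieces : PySem.Dict Char Int :=
  PySem.Dict.ofList [('r', 5), ('b', 3), ('n', 3), ('q', 9), ('p', 1)]

-- A's for-loop with its early return at the first space; a missing dict key (KeyError)
-- leaves the accumulators unchanged (the 'continue').
def pvLoopA : List Char → Int → Int → Bool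
  | [], w, b => decide (w ≤ 13) && decide (b ≤ 13)
  | c :: rest, w, b =>
    if c = ' ' then decide (w ≤ 13) && decide (b ≤ 13)
    else if PySem.Chars.islower c then
      match pvBlackPieces.get? c with
      | some v => pvLoopA rest w (b + v)
      | none => pvLoopA rest w b
    else if PySem.Chars.isupper c then
      match pvWhitePieces.get? c with
      | some v => pvLoopA rest (w + v) b
      | none => pvLoopA rest w b
    else pvLoopA rest w b

def check_if_is_endgame (fen : String) : Bool := pvLoopA fen.toList 0 0

-- ===== PORT B =====
def check_if_is_endgame_alt (fen : String) : Bool :=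
  -- board = fen.split(' ', 1)[0]
  let board : List Char := (PySem.Chars.splitOnMax fen.toList [' '] 1).headD []
  -- counts = {}; for c in board: counts[c] = counts.get(c, 0) + 1
  let counts : PySem.Dict Char Int :=
    board.foldl (fun d c => d.insert c (d.getD c 0 + 1)) PySem.Dict.empty
  -- w_material = sum(white_pieces[c] * n for c, n in counts.items() if c in white_pieces)
  let w := ((counts.items.filter (fun p => pvWhitePieces.contains p.1)).map
    (fun p => pvWhitePieces.getD p.1 0 * p.2)).sum
  let b := ((counts.items.filter (fun p => pvBlackPieces.contains p.1)).map
    (fun p => pvBlackPieces.getD p.1 0 * p.2)).sum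
  decide (w ≤ 13) && decide (b ≤ 13)

-- ===== PRECONDITION & SPEC =====
def Spec_check_if_is_endgame (fen : String) (out : Bool) : Prop := out = check_if_is_endgame_alt fen
instance (fen : String) (out : Bool) : Decidable (Spec_check_if_is_endgame fen out) := by unfold Spec_check_if_is_endgame; infer_instance

-- ===== CLAIM (what is proved, stated in full; the proofs are below) =====
def Claim_equal_check_if_is_endgame : Prop := ∀ (fen : String), Dom_check_if_is_endgame fen → Spec_check_if_is_endgame fen (check_if_is_endgame fen)

-- ===== LEMMAS AND PROOFS =====

-- per-character values as A's branch structure computes them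
def pvBval (c : Char) : Int :=
  if PySem.Chars.islower c then pvBlackPieces.getD c 0 else 0

def pvWval (c : Char) : Int :=
  if PySem.Chars.islower c then 0
  else if PySem.Chars.isupper c then pvWhitePieces.getD c 0 else 0

theorem pv_go_zero (sep : List Char) (fuel : Nat) (l cur : List Char) (acc : List (List Char)) :
    PySem.Chars.splitOnMax.go sep fuel 0 l cur acc = ((cur.reverse ++ l) :: acc).reverse := by
  cases fuel <;> cases l <;> simp [PySem.Chars.splitOnMax.go]

theorem pv_go_one_head (fuel : Nat) (l cur : List Char) (h : l.length < fuel) :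
    (PySem.Chars.splitOnMax.go [' '] fuel 1 l cur []).headD [] =
      cur.reverse ++ l.takeWhile (fun c => c != ' ') := by
  induction fuel generalizing l cur with
  | zero => omega
  | succ fuel ih =>
    cases l with
    | nil => simp [PySem.Chars.splitOnMax.go]
    | cons c rest =>
      by_cases hc : c = ' '
      · subst hc
        simp [PySem.Chars.splitOnMax.go, List.isPrefixOf, pv_go_zero]
      · have hrest : rest.length < fuel := by simpa using h
        have hcb2 : (' ' == c) = false := beq_eq_false_iff_ne.mpr (fun h' => hc h'.symm)
        have h2 := ih rest (c :: cur) hrest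
        simp only [List.headD_eq_head?_getD] at h2
        simp [PySem.Chars.splitOnMax.go, List.isPrefixOf, hcb2, List.headD_eq_head?_getD, h2, hc]

theorem pv_board_eq (cs : List Char) :
    (PySem.Chars.splitOnMax cs [' '] 1).headD [] = cs.takeWhile (fun c => c != ' ') := by
  have h1 : ¬ ((1 : Int) < 0) := by decide
  simpa [PySem.Chars.splitOnMax, h1] using pv_go_one_head (cs.length + 1) cs [] (by omega)

theorem pv_wgetD (c : Char) :
    pvWhitePieces.getD c 0 =
      (if c = 'R' then 5 else if c = 'B' then 3 else if c = 'N' then 3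
       else if c = 'Q' then 9 else if c = 'P' then 1 else 0) := by
  by_cases hR : c = 'R'; · subst hR; decide
  by_cases hB : c = 'B'; · subst hB; decide
  by_cases hN : c = 'N'; · subst hN; decide
  by_cases hQ : c = 'Q'; · subst hQ; decide
  by_cases hP : c = 'P'; · subst hP; decide
  have h1 : ('R' == c) = false := beq_eq_false_iff_ne.mpr (Ne.symm hR)
  have h2 : ('B' == c) = false := beq_eq_false_iff_ne.mpr (Ne.symm hB)
  have h3 : ('N' == c) = false := beq_eq_false_iff_ne.mpr (Ne.symm hN)
  have h4 : ('Q' == c) = false := beq_eq_false_iff_ne.mpr (Ne.symm hQ)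
  have h5 : ('P' == c) = false := beq_eq_false_iff_ne.mpr (Ne.symm hP)
  have hd : pvWhitePieces = PySem.Dict.mk [('R', (5 : Int)), ('B', 3), ('N', 3), ('Q', 9), ('P', 1)] := by rfl
  rw [hd]
  simp [PySem.Dict.getD, PySem.Dict.get?, hR, hB, hN, hQ, hP, h1, h2, h3, h4, h5]

theorem pv_bgetD (c : Char) :
    pvBlackPieces.getD c 0 =
      (if c = 'r' then 5 else if c = 'b' then 3 else if c = 'n' then 3
       else if c = 'q' then 9 else if c = 'p' then 1 else 0) := by
  by_cases hR : c = 'r'; · subst hR; decide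
  by_cases hB : c = 'b'; · subst hB; decide
  by_cases hN : c = 'n'; · subst hN; decide
  by_cases hQ : c = 'q'; · subst hQ; decide
  by_cases hP : c = 'p'; · subst hP; decide
  have h1 : ('r' == c) = false := beq_eq_false_iff_ne.mpr (Ne.symm hR)
  have h2 : ('b' == c) = false := beq_eq_false_iff_ne.mpr (Ne.symm hB)
  have h3 : ('n' == c) = false := beq_eq_false_iff_ne.mpr (Ne.symm hN)
  have h4 : ('q' == c) = false := beq_eq_false_iff_ne.mpr (Ne.symm hQ)
  have h5 : ('p' == c) = false := beq_eq_false_iff_ne.mpr (Ne.symm hP)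
  have hd : pvBlackPieces = PySem.Dict.mk [('r', (5 : Int)), ('b', 3), ('n', 3), ('q', 9), ('p', 1)] := by rfl
  rw [hd]
  simp [PySem.Dict.getD, PySem.Dict.get?, hR, hB, hN, hQ, hP, h1, h2, h3, h4, h5]

theorem pv_wval_eq (c : Char) : pvWval c = pvWhitePieces.getD c 0 := by
  by_cases hR : c = 'R'; · subst hR; decide
  by_cases hB : c = 'B'; · subst hB; decide
  by_cases hN : c = 'N'; · subst hN; decide
  by_cases hQ : c = 'Q'; · subst hQ; decide
  by_cases hP : c = 'P'; · subst hP; decide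
  simp [pvWval, pv_wgetD, hR, hB, hN, hQ, hP]

theorem pv_bval_eq (c : Char) : pvBval c = pvBlackPieces.getD c 0 := by
  by_cases hR : c = 'r'; · subst hR; decide
  by_cases hB : c = 'b'; · subst hB; decide
  by_cases hN : c = 'n'; · subst hN; decide
  by_cases hQ : c = 'q'; · subst hQ; decide
  by_cases hP : c = 'p'; · subst hP; decide
  simp [pvBval, pv_bgetD, hR, hB, hN, hQ, hP]

theorem pv_loopA_inv (l : List Char) (w b : Int) :
    pvLoopA l w b =
      (decide (w + ((l.takeWhile (fun c => c != ' ')).map pvWval).sum ≤ 13) &&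
       decide (b + ((l.takeWhile (fun c => c != ' ')).map pvBval).sum ≤ 13)) := by
  induction l generalizing w b with
  | nil => simp [pvLoopA]
  | cons c rest ih =>
    by_cases hc : c = ' '
    · subst hc; simp [pvLoopA]
    · have hcb : (c != ' ') = true := by simpa using hc
      have htw : (c :: rest).takeWhile (fun c => c != ' ') =
          c :: rest.takeWhile (fun c => c != ' ') := by
        simp [hcb]
      rw [htw, List.map_cons, List.sum_cons, List.map_cons, List.sum_cons]
      by_cases hl : PySem.Chars.islower c = true
      · cases hget : pvBlackPieces.get? c with
        | some v =>
          have hv : pvBval c = v := by simp [pvBval, hl, PySem.Dict.getD, hget]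
          have hw0 : pvWval c = 0 := by simp [pvWval, hl]
          simp [pvLoopA, hc, hl, hget, ih, hv, hw0, add_assoc]
        | none =>
          have hv : pvBval c = 0 := by simp [pvBval, hl, PySem.Dict.getD, hget]
          have hw0 : pvWval c = 0 := by simp [pvWval, hl]
          simp [pvLoopA, hc, hl, hget, ih, hv, hw0]
      · by_cases hu : PySem.Chars.isupper c = true
        · cases hget : pvWhitePieces.get? c with
          | some v =>
            have hv : pvWval c = v := by simp [pvWval, hl, hu, PySem.Dict.getD, hget]
            have hb0 : pvBval c = 0 := by simp [pvBval, hl]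
            simp [pvLoopA, hc, hl, hu, hget, ih, hv, hb0, add_assoc]
          | none =>
            have hv : pvWval c = 0 := by simp [pvWval, hl, hu, PySem.Dict.getD, hget]
            have hb0 : pvBval c = 0 := by simp [pvBval, hl]
            simp [pvLoopA, hc, hl, hu, hget, ih, hv, hb0]
        · have hv : pvWval c = 0 := by simp [pvWval, hl, hu]
          have hb0 : pvBval c = 0 := by simp [pvBval, hl]
          simp [pvLoopA, hc, hl, hu, ih, hv, hb0]

theorem pv_sum_filter_map (S : List Char) (d : PySem.Dict Char Int) (cnt : Char → Int) :
    (((S.map (fun k => (k, cnt k))).filter (fun p => d.contains p.1)).map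
      (fun p => d.getD p.1 0 * p.2)).sum =
    (S.map (fun k => d.getD k 0 * cnt k)).sum := by
  induction S with
  | nil => simp
  | cons k t ih =>
    by_cases hk : d.contains k = true
    · simp [hk, ih]
    · have h0 : d.getD k 0 = 0 := by
        cases hget : d.get? k with
        | some v => exact absurd (by simp [PySem.Dict.contains_eq_isSome_get?, hget]) hk
        | none => simp [PySem.Dict.getD, hget]
      simp [hk, ih, h0]

theorem pv_sum_dedup_count (t : List Char) (f : Char → Int) :
    ((PySem.Set.ofList t).map (fun k => f k * (t.count k : Int))).sum = (t.map f).sum := by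
  have hnd : (PySem.Set.ofList t).Nodup := PySem.Set.nodup_ofList t
  have hfin : (PySem.Set.ofList t).toFinset = t.toFinset := by
    ext x; simp [List.mem_toFinset, PySem.Set.mem_ofList]
  calc ((PySem.Set.ofList t).map (fun k => f k * (t.count k : Int))).sum
      = ∑ x ∈ (PySem.Set.ofList t).toFinset, f x * (t.count x : Int) :=
        (List.sum_toFinset _ hnd).symm
    _ = ∑ x ∈ t.toFinset, (t.count x) • f x := by
        rw [hfin]; exact Finset.sum_congr rfl (fun x _ => by
          rw [nsmul_eq_mul]; ring)
    _ = (t.map f).sum := (Finset.sum_list_map_count t f).symm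

-- ===== VERDICT (by name: the statement is the Claim_ definition above) =====
theorem check_if_is_endgame_spec : Claim_equal_check_if_is_endgame := by
  intro fen _
  unfold Spec_check_if_is_endgame check_if_is_endgame check_if_is_endgame_alt
  rw [pv_board_eq, pv_loopA_inv]
  have hw : ∀ t : List Char,
      (t.map pvWval).sum = (t.map (fun k => pvWhitePieces.getD k 0)).sum := fun t => by
    exact congrArg List.sum (List.map_congr_left fun c _ => pv_wval_eq c)
  have hb : ∀ t : List Char,
      (t.map pvBval).sum = (t.map (fun k => pvBlackPieces.getD k 0)).sum := fun t => by
    exact congrArg List.sum (List.map_congr_left fun c _ => pv_bval_eq c)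
  simp only [PySem.Dict.foldl_insert_getD_add_one_eq_counter, PySem.Dict.items_counter,
    pv_sum_filter_map, pv_sum_dedup_count, hw, hb, zero_add]
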